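-- pv_equiv track=rewrite | github.com/GGN-2015/pd-code-n-cabling | pd_code_n_cabling/main.py | renumbering
-- ===== SOURCE A (Python) =====
-- def renumbering(arr) -> list:
--     all_id= []
--     for item in arr:
--         for term in item:
--             if term not in all_id:
--                 all_id.append(term)
--     all_id  = sorted(all_id)
--     get_new_idx = {
--         old_id: new_id + 1
--         for new_id, old_id in enumerate(all_id)
--     }
--     new_pd_code = []
--     for old_item in arr:
--         new_item = []
--         for old_term in old_item:
--             new_item.append(get_new_idx[old_term])
--         new_pd_code.append(new_item)
--     return new_pd_code
-- ===== SOURCE B (Python) =====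
-- def renumbering(arr) -> list:
--     # One sorted sweep with scatter-writes: flatten to (value, i, j) triples, sort
--     # by value, then walk them once keeping a running rank (bumped whenever the
--     # value changes) and write the rank straight into a pre-shaped result.
--     # No dedup pass, no old->new lookup dict, no per-term lookup.
--     triples = sorted(
--         ((term, i, j) for i, item in enumerate(arr) for j, term in enumerate(item)),
--         key=lambda t: t[0],
--     )
--     result = [[None] * len(item) for item in arr]
--     rank = 0
--     prev = None
--     for v, i, j in triples:
--         if prev is None or v != prev:
--             rank += 1
--             prev = v
--         result[i][j] = rank
--     return result
-- ===== Notes on version B (the rewrite author's own statement) =====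
-- stated objective: faster
-- what changed: B replaces A's quadratic membership-scan dedup and old->new lookup dict by a single sorted sweep over (value,i,j) position triples that scatter-writes a running rank (bumped on value change) into a pre-shaped result, so no distinct-value list and no dict lookup per term exist.
import Mathlib
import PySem

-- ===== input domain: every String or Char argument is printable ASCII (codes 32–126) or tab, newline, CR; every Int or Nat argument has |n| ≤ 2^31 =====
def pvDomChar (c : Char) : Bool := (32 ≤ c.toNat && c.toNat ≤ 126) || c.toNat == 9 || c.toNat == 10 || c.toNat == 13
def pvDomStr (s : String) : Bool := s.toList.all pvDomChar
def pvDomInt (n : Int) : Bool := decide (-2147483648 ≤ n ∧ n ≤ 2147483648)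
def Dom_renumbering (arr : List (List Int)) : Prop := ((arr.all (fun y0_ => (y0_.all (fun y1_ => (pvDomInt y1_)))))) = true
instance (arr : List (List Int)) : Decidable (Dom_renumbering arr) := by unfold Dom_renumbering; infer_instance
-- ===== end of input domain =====

-- B replaces A's membership-scan dedup + old→new lookup dict by one sorted sweep over
-- (value, i, j) position triples that scatter-writes a running rank into a pre-shaped result.


-- ===== PORT A =====
def renumbering (arr : List (List Int)) : List (List Int) :=
  let all_id : List Int := arr.foldl (fun acc item =>
      item.foldl (fun acc2 term => if term ∈ acc2 then acc2 else acc2 ++ [term]) acc) []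
  let all_id := PySem.List.sorted all_id (fun x => x) false
  let get_new_idx : PySem.Dict Int Int := (PySem.List.enumerate all_id 0).foldl
      (fun d p => d.insert p.2 (p.1 + 1)) PySem.Dict.empty
  -- get_new_idx[old_term]: every old_term was collected into all_id, so the key is always
  -- present and the lookup never raises; getD with an unused default is exact here.
  arr.foldl (fun new_pd_code old_item =>
      new_pd_code ++ [old_item.foldl (fun new_item old_term =>
        new_item ++ [get_new_idx.getD old_term 0]) []]) []

-- ===== PORT B =====
-- the generator expression '(term, i, j) for i, item in enumerate(arr) for j, term in enumerate(item)';
-- the i, j produced by enumerate are nonneg and only index same-length lists, so Nat is exact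
def pvTriples (arr : List (List Int)) : List (Int × Nat × Nat) :=
  arr.zipIdx.flatMap (fun p => p.1.zipIdx.map (fun q => (q.1, p.2, q.2)))

-- one iteration of B's sweep loop: state = (result, rank, prev); 'prev is None or v != prev'
-- is prev ≠ some v, and after the branch prev = v in either case
def pvStepB (st : List (List Int) × Int × Option Int) (t : Int × Nat × Nat) :
    List (List Int) × Int × Option Int :=
  let rank := if st.2.2 = some t.1 then st.2.1 else st.2.1 + 1
  (st.1.set t.2.1 ((st.1.getD t.2.1 []).set t.2.2 rank), rank, some t.1)

def renumbering_alt (arr : List (List Int)) : List (List Int) :=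
  let triples := PySem.List.sorted (pvTriples arr) (fun t => t.1) false
  -- result = [[None]*len(item) for item in arr]: 0 stands for None; every cell is overwritten
  (triples.foldl pvStepB (arr.map (fun item => item.map (fun _ => (0 : Int))), 0, none)).1

-- ===== PRECONDITION & SPEC =====
def Spec_renumbering (arr : List (List Int)) (out : List (List Int)) : Prop := out = renumbering_alt arr
instance (arr : List (List Int)) (out : List (List Int)) : Decidable (Spec_renumbering arr out) := by unfold Spec_renumbering; infer_instance

-- ===== CLAIM (what is proved, stated in full; the proofs are below) =====
def Claim_equal_renumbering : Prop := ∀ (arr : List (List Int)), Dom_renumbering arr → Spec_renumbering arr (renumbering arr)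

-- ===== LEMMAS AND PROOFS =====

-- the new id both programs assign to value v: 1 + (number of distinct values of arr below v)
def pvG (D : List Int) (v : Int) : Int := 1 + (D.countP (fun w => decide (w < v)) : Int)

-- the write B's loop body performs, with the rank expressed by pvG
def pvWrite (f : Int → Int) (res : List (List Int)) (t : Int × Nat × Nat) : List (List Int) :=
  res.set t.2.1 ((res.getD t.2.1 []).set t.2.2 (f t.1))

-- ---------- A-side: A's dict lookup is pvG ----------

-- A's dedup loop builds exactly set(flatten(arr)) in first-insertion order.
lemma pv_allid_eq (arr : List (List Int)) :
    arr.foldl (fun acc item =>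
      item.foldl (fun acc2 term => if term ∈ acc2 then acc2 else acc2 ++ [term]) acc) []
      = PySem.Set.ofList arr.flatten := by
  have hadd : (fun acc2 term => if term ∈ acc2 then acc2 else acc2 ++ [term])
      = (PySem.Set.add : PySem.Set Int → Int → PySem.Set Int) := by
    funext acc2 term
    rw [PySem.Set.add_eq_ite]
  rw [PySem.Set.ofList_eq_foldl, List.foldl_flatten, hadd]

-- the sorted distinct-value list is strictly increasing
lemma pv_sorted_strict (arr : List (List Int)) :
    (PySem.List.sorted (PySem.Set.ofList arr.flatten) (fun x => x) false).Pairwise (· < ·) := by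
  have hle := PySem.List.sorted_pairwise (xs := PySem.Set.ofList arr.flatten) (key := fun x => x)
  have hnd : (PySem.List.sorted (PySem.Set.ofList arr.flatten) (fun x => x) false).Nodup :=
    (PySem.List.sorted_perm _ _ _).nodup_iff.mpr (PySem.Set.nodup_ofList _)
  have := hle.and hnd
  exact this.imp (fun {a b} h => lt_of_le_of_ne h.1 h.2)

-- for a term occurring in arr, A's dict lookup returns pvG of the distinct values
lemma pv_lookup_eq (arr : List (List Int)) (t : Int) (ht : t ∈ arr.flatten) :
    ((PySem.List.enumerate (PySem.List.sorted (PySem.Set.ofList arr.flatten) (fun x => x) false) 0).foldl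
      (fun d p => d.insert p.2 (p.1 + 1)) PySem.Dict.empty).getD t 0
    = pvG (PySem.Set.ofList arr.flatten) t := by
  set s := PySem.List.sorted (PySem.Set.ofList arr.flatten) (fun x => x) false with hs
  have hperm : s.Perm (PySem.Set.ofList arr.flatten) := PySem.List.sorted_perm _ _ _
  have hts : t ∈ s := hperm.mem_iff.mpr ((PySem.Set.mem_ofList _ _).mpr ht)
  have hnd : s.Nodup := hperm.nodup_iff.mpr (PySem.Set.nodup_ofList _)
  have hstrict : s.Pairwise (· < ·) := pv_sorted_strict arr
  obtain ⟨l1, l2, hsplit⟩ := List.append_of_mem hts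
  have hitems : ((PySem.List.enumerate s 0).foldl
      (fun d p => d.insert p.2 (p.1 + 1)) PySem.Dict.empty).items
      = (PySem.List.enumerate s 0).map (fun p => (p.2, p.1 + 1)) := by
    have := PySem.Dict.items_foldl_insert_fresh (PySem.List.enumerate s 0)
      (fun p => p.2) (fun p => p.1 + 1) PySem.Dict.empty
      (fun a _ => PySem.Dict.contains_empty _)
      (by rw [PySem.List.map_snd_enumerate]; exact hnd)
    simpa using this
  have hkeys : ((PySem.List.enumerate s 0).foldl
      (fun d p => d.insert p.2 (p.1 + 1)) PySem.Dict.empty).keys.Nodup := by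
    have := PySem.Dict.nodup_keys_foldl_insert_key (PySem.List.enumerate s 0)
      (fun p => p.2) (fun _ p => p.1 + 1) PySem.Dict.empty (by simp [PySem.Dict.keys_empty])
    simpa using this
  have hmem : (t, ((l1.length : Int) + 1)) ∈ ((PySem.List.enumerate s 0).foldl
      (fun d p => d.insert p.2 (p.1 + 1)) PySem.Dict.empty).items := by
    rw [hitems, hsplit, PySem.List.enumerate_append]
    refine List.mem_map.mpr ⟨((0 : Int) + l1.length, t), ?_, by simp⟩
    simp [PySem.List.enumerate_cons]
  have hget := PySem.Dict.getD_of_mem_items _ hmem hkeys 0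
  rw [hget]
  have hcount : (PySem.Set.ofList arr.flatten).countP (fun v => decide (v < t)) = l1.length := by
    rw [← hperm.countP_eq, hsplit, List.countP_append]
    have hpw := hsplit ▸ hstrict
    rw [List.pairwise_append] at hpw
    obtain ⟨hpl1, hpl2, hcross⟩ := hpw
    have h1 : List.countP (fun v => decide (v < t)) l1 = l1.length :=
      List.countP_eq_length.mpr (fun a ha => by
        simpa using hcross a ha t (List.mem_cons_self))
    have h2 : List.countP (fun v => decide (v < t)) (t :: l2) = 0 := by
      refine List.countP_eq_zero.mpr ?_
      intro a ha
      rcases List.mem_cons.mp ha with rfl | ha'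
      · simp
      · have := (List.pairwise_cons.mp hpl2).1 a ha'
        simp [not_lt.mpr (le_of_lt this)]
    rw [h1, h2]
    omega
  rw [pvG, hcount]
  omega

-- A's output, characterised pointwise
lemma pv_a_char (arr : List (List Int)) :
    renumbering arr
      = arr.map (fun item => item.map (pvG (PySem.Set.ofList arr.flatten))) := by
  unfold renumbering
  simp only [pv_allid_eq]
  rw [PySem.List.foldl_append_singleton_eq_map, List.nil_append]
  refine List.map_congr_left (fun item hitem => ?_)
  rw [PySem.List.foldl_append_singleton_eq_map, List.nil_append]
  refine List.map_congr_left (fun term hterm => ?_)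
  exact pv_lookup_eq arr term (List.mem_flatten.mpr ⟨item, hitem, hterm⟩)

-- ---------- B-side: the sweep scatter-writes pvG into every cell ----------

-- splitting a strict-lower count at p ≤ v
lemma pv_countP_split (L : List Int) (p v : Int) (hpv : p ≤ v) :
    L.countP (fun w => decide (w < v))
      = L.countP (fun w => decide (w < p)) + L.countP (fun w => decide (p ≤ w ∧ w < v)) := by
  induction L with
  | nil => simp
  | cons a L ih =>
    simp only [List.countP_cons, ih, decide_eq_true_eq]
    split_ifs <;> omega

lemma pv_countP_between_one (D : List Int) (hD : D.Nodup) (p v : Int) (hp : p ∈ D) (hpv : p < v)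
    (hq : ∀ w ∈ D, p ≤ w → w < v → w = p) :
    D.countP (fun w => decide (p ≤ w ∧ w < v)) = 1 := by
  have h1 : D.countP (fun w => decide (p ≤ w ∧ w < v)) = D.countP (fun w => w == p) := by
    refine List.countP_congr (fun x hx => ?_)
    simp only [decide_eq_true_eq, beq_iff_eq]
    constructor
    · rintro ⟨ha, hb⟩; exact hq x hx ha hb
    · rintro rfl; exact ⟨le_refl _, hpv⟩
  rw [h1]
  have := List.count_eq_one_of_mem hD hp
  simpa [List.count] using this

-- B's loop computes, at each triple, rank = pvG of the triple's value; so the whole fold is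
-- the pure write fold pvWrite (pvG D) applied to the sorted triples
lemma pv_fold_eq (D : List Int) (hD : D.Nodup) :
    ∀ (ts : List (Int × Nat × Nat)) (res : List (List Int)) (rank : Int) (prev : Option Int),
      ts.Pairwise (fun a b => a.1 ≤ b.1) →
      (∀ t ∈ ts, t.1 ∈ D) →
      (match prev with
       | none => rank = 0 ∧ ∀ w ∈ D, w ∈ ts.map (·.1)
       | some p => rank = pvG D p ∧ p ∈ D ∧ (∀ t ∈ ts, p ≤ t.1) ∧
           (∀ w ∈ D, w ≤ p ∨ w ∈ ts.map (·.1))) →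
      (ts.foldl pvStepB (res, rank, prev)).1 = ts.foldl (pvWrite (pvG D)) res := by
  intro ts
  induction ts with
  | nil => intro res rank prev _ _ _; rfl
  | cons t ts ih =>
    intro res rank prev hpw hvals hinv
    obtain ⟨v, i, j⟩ := t
    have hvD : v ∈ D := hvals _ List.mem_cons_self
    obtain ⟨hhead, hpw'⟩ := List.pairwise_cons.mp hpw
    -- the rank written at this triple is pvG D v
    have hrank : (if prev = some v then rank else rank + 1) = pvG D v := by
      match prev, hinv with
      | none, ⟨hr0, hall⟩ =>
        have hz : D.countP (fun w => decide (w < v)) = 0 := by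
          refine List.countP_eq_zero.mpr (fun w hw => ?_)
          have := hall w hw
          simp only [List.map_cons, List.mem_cons] at this
          rcases this with rfl | hmem
          · simp
          · obtain ⟨t', ht', rfl⟩ := List.mem_map.mp hmem
            have := hhead t' ht'
            simp only [decide_eq_true_eq]
            omega
        simp [pvG, hz, hr0]
      | some p, ⟨hr, hpD, hple, hcover⟩ =>
        by_cases hpv : p = v
        · subst hpv; simp [hr]
        · have hlt : p < v := lt_of_le_of_ne (hple _ List.mem_cons_self) hpv
          have hone : D.countP (fun w => decide (p ≤ w ∧ w < v)) = 1 := by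
            refine pv_countP_between_one D hD p v hpD hlt (fun w hw hwp hwv => ?_)
            rcases hcover w hw with hle | hmem
            · omega
            · simp only [List.map_cons, List.mem_cons] at hmem
              rcases hmem with rfl | hmem
              · omega
              · obtain ⟨t', ht', rfl⟩ := List.mem_map.mp hmem
                have := hhead t' ht'
                omega
          have hsplit := pv_countP_split D p v (le_of_lt hlt)
          simp only [pvG] at hr ⊢
          rw [if_neg (by simp [hpv])]
          omega
    -- step, then apply the induction hypothesis with prev' = some v
    rw [List.foldl_cons, List.foldl_cons]
    have hstate : pvStepB (res, rank, prev) (v, i, j)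
        = (pvWrite (pvG D) res (v, i, j), pvG D v, some v) := by
      simp only [pvStepB, pvWrite]
      rw [hrank]
    rw [hstate]
    have hcover' : ∀ w ∈ D, w ≤ v ∨ w ∈ ts.map (·.1) := by
      intro w hw
      have hfromcons : w ∈ (((v, i, j) : Int × Nat × Nat) :: ts).map (·.1) → w ≤ v ∨ w ∈ ts.map (·.1) := by
        intro h
        simp only [List.map_cons, List.mem_cons] at h
        rcases h with rfl | h
        · exact Or.inl le_rfl
        · exact Or.inr h
      match prev, hinv with
      | none, ⟨_, hall⟩ => exact hfromcons (hall w hw)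
      | some p, ⟨_, _, hple, hcover⟩ =>
        rcases hcover w hw with hle | hmem
        · exact Or.inl (le_trans hle (hple _ List.mem_cons_self))
        · exact hfromcons hmem
    exact ih (pvWrite (pvG D) res (v, i, j)) (pvG D v) (some v) hpw'
      (fun t' ht' => hvals t' (List.mem_cons_of_mem _ ht'))
      ⟨rfl, hvD, hhead, hcover'⟩

-- ---------- write-fold: shape preservation and pointwise value ----------

lemma pv_write_length (f : Int → Int) (res : List (List Int)) (t : Int × Nat × Nat) :
    (pvWrite f res t).length = res.length := List.length_set

lemma pv_write_getD_length (f : Int → Int) (res : List (List Int)) (t : Int × Nat × Nat) (k : Nat) :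
    ((pvWrite f res t).getD k []).length = (res.getD k []).length := by
  rcases t with ⟨v, i, j⟩
  by_cases hik : i = k
  · subst hik
    by_cases hl : i < res.length
    · simp [pvWrite, List.getD_eq_getElem?_getD, hl]
    · simp [pvWrite, List.getD_eq_getElem?_getD, hl]
  · simp [pvWrite, List.getD_eq_getElem?_getD, hik]

lemma pv_writefold_length (f : Int → Int) :
    ∀ (ts : List (Int × Nat × Nat)) (res : List (List Int)),
      (ts.foldl (pvWrite f) res).length = res.length := by
  intro ts
  induction ts with
  | nil => intro res; rfl
  | cons t ts ih => intro res; rw [List.foldl_cons, ih, pv_write_length]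

lemma pv_writefold_getD_length (f : Int → Int) :
    ∀ (ts : List (Int × Nat × Nat)) (res : List (List Int)) (k : Nat),
      ((ts.foldl (pvWrite f) res).getD k []).length = (res.getD k []).length := by
  intro ts
  induction ts with
  | nil => intro res k; rfl
  | cons t ts ih => intro res k; rw [List.foldl_cons, ih, pv_write_getD_length]

lemma pv_write_getD_eq (f : Int → Int) (res : List (List Int)) (w : Int) (i j : Nat)
    (hi : i < res.length) (hj : j < (res.getD i []).length) :
    ((pvWrite f res (w, i, j)).getD i []).getD j 0 = f w := by
  have h1 : (pvWrite f res (w, i, j)).getD i [] = (res.getD i []).set j (f w) := by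
    simp [pvWrite, List.getD_eq_getElem?_getD, hi]
  rw [h1]
  rw [List.getD_eq_getElem?_getD] at hj
  simp [List.getD_eq_getElem?_getD, hj]

lemma pv_write_getD_ne (f : Int → Int) (res : List (List Int)) (w : Int) (a b i j : Nat)
    (hne : ¬(a = i ∧ b = j)) :
    ((pvWrite f res (w, a, b)).getD i []).getD j 0 = (res.getD i []).getD j 0 := by
  by_cases hai : a = i
  · subst hai
    have hbj : b ≠ j := fun h => hne ⟨rfl, h⟩
    by_cases hl : a < res.length
    · have h1 : (pvWrite f res (w, a, b)).getD a [] = (res.getD a []).set b (f w) := by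
        simp [pvWrite, List.getD_eq_getElem?_getD, hl]
      rw [h1]
      simp [List.getD_eq_getElem?_getD, hbj]
    · simp [pvWrite, List.getD_eq_getElem?_getD, hl]
  · simp [pvWrite, List.getD_eq_getElem?_getD, hai]

lemma pv_writefold_getD (f : Int → Int) :
    ∀ (ts : List (Int × Nat × Nat)) (res : List (List Int)) (i j : Nat) (v : Int),
      (∀ t ∈ ts, t.2 = (i, j) → t.1 = v) →
      i < res.length → j < (res.getD i []).length →
      ((ts.foldl (pvWrite f) res).getD i []).getD j 0
        = if (i, j) ∈ ts.map (·.2) then f v else (res.getD i []).getD j 0 := by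
  intro ts
  induction ts with
  | nil => intro res i j v _ _ _; simp
  | cons t ts ih =>
    intro res i j v hv hi hj
    rcases t with ⟨w, a, b⟩
    rw [List.foldl_cons]
    have hlen1 : i < (pvWrite f res (w, a, b)).length := by rw [pv_write_length]; exact hi
    have hlen2 : j < ((pvWrite f res (w, a, b)).getD i []).length := by
      rw [pv_write_getD_length]; exact hj
    rw [ih (pvWrite f res (w, a, b)) i j v
      (fun t' ht' he => hv t' (List.mem_cons_of_mem _ ht') he) hlen1 hlen2]
    by_cases hpos : ((a, b) : Nat × Nat) = (i, j)
    · obtain ⟨ha, hb⟩ := Prod.mk.injEq a b i j ▸ hpos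
      subst ha; subst hb
      have hw : w = v := hv (w, a, b) List.mem_cons_self rfl
      rw [pv_write_getD_eq f res w a b hi hj, hw]
      simp
    · have hne : ¬(a = i ∧ b = j) := fun ⟨h1, h2⟩ => hpos (by rw [h1, h2])
      rw [pv_write_getD_ne f res w a b i j hne]
      have hmapne : ((i, j) : Nat × Nat) ∈ ((w, a, b) :: ts).map (·.2) ↔ (i, j) ∈ ts.map (·.2) := by
        simp only [List.map_cons, List.mem_cons]
        constructor
        · rintro (h | h)
          · exact absurd h.symm hpos
          · exact h
        · exact Or.inr
      rw [if_congr hmapne rfl rfl]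

-- ---------- the triple list ----------

lemma pv_triples_map_fst (arr : List (List Int)) :
    (pvTriples arr).map (·.1) = arr.flatten := by
  have hrow : ∀ (l : List Int), l.zipIdx.map (fun q => q.1) = l :=
    fun l => List.zipIdx_map_fst 0 l
  simp only [pvTriples, List.map_flatMap, List.map_map]
  have hfun : (fun a : List Int × Nat =>
      List.map ((fun x : Int × Nat × Nat => x.1) ∘ fun q : Int × Nat => (q.1, a.2, q.2)) a.1.zipIdx)
      = fun a : List Int × Nat => a.1 := by
    funext a
    exact hrow a.1
  rw [hfun, List.flatMap_def]
  rw [show arr.zipIdx.map (fun a : List Int × Nat => a.1) = arr from List.zipIdx_map_fst 0 arr]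

lemma pv_mem_triples (arr : List (List Int)) (t : Int × Nat × Nat) (ht : t ∈ pvTriples arr) :
    ∃ (hi : t.2.1 < arr.length) (hj : t.2.2 < (arr[t.2.1]'hi).length),
      (arr[t.2.1]'hi)[t.2.2]'hj = t.1 := by
  obtain ⟨p, hp, ht'⟩ := List.mem_flatMap.mp ht
  obtain ⟨q, hq, rfl⟩ := List.mem_map.mp ht'
  rcases p with ⟨row, i⟩
  rcases q with ⟨x, j⟩
  have h1 : arr[i]? = some row := List.mk_mem_zipIdx_iff_getElem?.mp hp
  have h2 : row[j]? = some x := List.mk_mem_zipIdx_iff_getElem?.mp hq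
  obtain ⟨hi, hrow⟩ := List.getElem?_eq_some_iff.mp h1
  subst hrow
  obtain ⟨hj, hx⟩ := List.getElem?_eq_some_iff.mp h2
  exact ⟨hi, hj, hx⟩

lemma pv_triples_mem (arr : List (List Int)) (i j : Nat) (hi : i < arr.length)
    (hj : j < (arr[i]'hi).length) :
    ((arr[i]'hi)[j]'hj, i, j) ∈ pvTriples arr := by
  refine List.mem_flatMap.mpr ⟨(arr[i]'hi, i), ?_, ?_⟩
  · exact List.mk_mem_zipIdx_iff_getElem?.mpr (by simp [List.getElem?_eq_getElem hi])
  · exact List.mem_map.mpr ⟨((arr[i]'hi)[j]'hj, j),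
      List.mk_mem_zipIdx_iff_getElem?.mpr (by simp [List.getElem?_eq_getElem hj]), rfl⟩

-- B's output, characterised pointwise: same map as A's
lemma pv_alt_char (arr : List (List Int)) :
    renumbering_alt arr
      = arr.map (fun item => item.map (pvG (PySem.Set.ofList arr.flatten))) := by
  have hD : (PySem.Set.ofList arr.flatten).Nodup := PySem.Set.nodup_ofList _
  set D := PySem.Set.ofList arr.flatten with hDdef
  set ts := PySem.List.sorted (pvTriples arr) (fun t => t.1) false with hts
  set init := arr.map (fun item => item.map (fun _ => (0 : Int))) with hinit
  have hperm : ts.Perm (pvTriples arr) := PySem.List.sorted_perm _ _ _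
  have hpw : ts.Pairwise (fun a b => a.1 ≤ b.1) :=
    PySem.List.sorted_pairwise (pvTriples arr) (fun t => t.1)
  have hvals : ∀ t ∈ ts, t.1 ∈ D := by
    intro t htm
    have h0 : t ∈ pvTriples arr := hperm.mem_iff.mp htm
    have h1 : t.1 ∈ (pvTriples arr).map (·.1) := List.mem_map.mpr ⟨t, h0, rfl⟩
    rw [pv_triples_map_fst] at h1
    exact (PySem.Set.mem_ofList _ _).mpr h1
  have hcover : ∀ w ∈ D, w ∈ ts.map (·.1) := by
    intro w hw
    have h1 : w ∈ arr.flatten := (PySem.Set.mem_ofList _ _).mp hw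
    rw [← pv_triples_map_fst] at h1
    exact (hperm.map (·.1)).mem_iff.mpr h1
  have hfold := pv_fold_eq D hD ts init 0 none hpw hvals ⟨rfl, hcover⟩
  show (ts.foldl pvStepB (init, 0, none)).1 = _
  rw [hfold]
  have hWlen : (ts.foldl (pvWrite (pvG D)) init).length = arr.length := by
    rw [pv_writefold_length, hinit, List.length_map]
  apply List.ext_getElem
  · rw [hWlen, List.length_map]
  intro i h1 h2
  have hi : i < arr.length := by rwa [hWlen] at h1
  have hgetDi : init.getD i [] = (arr[i]'hi).map (fun _ => (0 : Int)) := by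
    rw [hinit, List.getD_eq_getElem?_getD, List.getElem?_map, List.getElem?_eq_getElem hi]
    rfl
  have hilen : i < init.length := by rw [hinit, List.length_map]; exact hi
  have hWgetD : ∀ k, ((ts.foldl (pvWrite (pvG D)) init).getD k []).length = (init.getD k []).length :=
    fun k => pv_writefold_getD_length (pvG D) ts init k
  have hinnerlen : ((ts.foldl (pvWrite (pvG D)) init).getD i []).length = (arr[i]'hi).length := by
    rw [hWgetD i, hgetDi, List.length_map]
  apply List.ext_getElem
  · rw [← List.getD_eq_getElem _ [] h1, hinnerlen, List.getElem_map, List.length_map]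
  intro j hj1 hj2
  have hj : j < (arr[i]'hi).length := by
    rwa [← List.getD_eq_getElem _ [] h1, hinnerlen] at hj1
  have hkey : ∀ t ∈ ts, t.2 = (i, j) → t.1 = (arr[i]'hi)[j]'hj := by
    intro t htm he
    obtain ⟨v, a, b⟩ := t
    obtain ⟨ha, hb⟩ := Prod.mk.injEq a b i j ▸ he
    subst ha; subst hb
    obtain ⟨hi', hj', hval⟩ := pv_mem_triples arr (v, a, b) (hperm.mem_iff.mp htm)
    exact hval.symm
  have hmemT : (((arr[i]'hi)[j]'hj, i, j) : Int × Nat × Nat) ∈ ts :=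
    hperm.mem_iff.mpr (pv_triples_mem arr i j hi hj)
  have hmempos : ((i, j) : Nat × Nat) ∈ ts.map (·.2) := List.mem_map.mpr ⟨_, hmemT, rfl⟩
  have hW := pv_writefold_getD (pvG D) ts init i j ((arr[i]'hi)[j]'hj) hkey hilen
    (by rw [hgetDi, List.length_map]; exact hj)
  rw [if_pos hmempos] at hW
  have eL : ((ts.foldl (pvWrite (pvG D)) init)[i]'h1)[j]'hj1
      = ((ts.foldl (pvWrite (pvG D)) init).getD i []).getD j 0 := by
    rw [List.getD_eq_getElem _ [] h1]
    exact (List.getD_eq_getElem _ 0 hj1).symm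
  rw [eL, hW]
  simp

-- ===== VERDICT (by name: the statement is the Claim_ definition above) =====
theorem renumbering_spec : Claim_equal_renumbering := by
  intro arr _
  unfold Spec_renumbering
  rw [pv_a_char, pv_alt_char]
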